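-- pv_equiv track=rewrite | github.com/260223-DF-AI/SmartI | FileProcessing/starter_code/modules/transformer.py | aggregate_by_store
-- ===== SOURCE A (Python) =====
-- def aggregate_by_store(records):
--     """
--     Aggregate sales by store_id.
--     Returns: Dict mapping store_id to total sales
--     """
--     storeSales = {} # Initialize dictionary for stores sales
--     for record in records: # Iterate through the records
--         if(record['store_id'] not in storeSales):
--             # Record's store_id isn't in storeSales. Set sales for the store to the total in the record
--             storeSales[record['store_id']] = record['total']
--         else:
--             # Record's store_id is in storeSales. Update total, add the record's total
--             storeSales[record['store_id']] += record['total']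
--
--     return storeSales
-- ===== SOURCE B (Python) =====
-- def aggregate_by_store(records):
--     """
--     Aggregate sales by store_id.
--     Returns: Dict mapping store_id to total sales
--     """
--     ids = list(dict.fromkeys(r['store_id'] for r in records))
--     return {sid: sum(r['total'] for r in records if r['store_id'] == sid)
--             for sid in ids}
-- ===== Notes on version B (the rewrite author's own statement) =====
-- stated objective: alternative
-- what changed: A's single pass that accumulates totals into a dict is replaced by a two-phase computation: first collect the distinct store_ids in first-occurrence order (dict.fromkeys), then build the result with one filtered sum over the records per store_id.
import Mathlib
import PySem

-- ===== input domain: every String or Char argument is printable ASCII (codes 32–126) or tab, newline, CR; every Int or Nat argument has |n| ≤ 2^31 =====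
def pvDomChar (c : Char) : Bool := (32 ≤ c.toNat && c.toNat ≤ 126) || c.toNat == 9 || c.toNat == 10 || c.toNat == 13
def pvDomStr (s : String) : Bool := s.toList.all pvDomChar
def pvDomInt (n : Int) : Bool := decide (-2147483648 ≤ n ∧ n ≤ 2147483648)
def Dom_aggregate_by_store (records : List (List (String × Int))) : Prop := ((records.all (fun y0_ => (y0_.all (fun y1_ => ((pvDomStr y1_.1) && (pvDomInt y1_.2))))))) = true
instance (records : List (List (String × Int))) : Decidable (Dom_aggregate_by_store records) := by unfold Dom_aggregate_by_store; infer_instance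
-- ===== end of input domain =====

-- B replaces A's single dict-accumulation pass by a two-phase computation (dedup the ids,
-- then one filtered sum per id); objective: alternative (not faster), return value provably equal.

-- shared record accessors: record['store_id'] / record['total'] (first-match dict lookup)
def pvSid (r : List (String × Int)) : Int := (PySem.Dict.mk r).getD "store_id" 0
def pvTot (r : List (String × Int)) : Int := (PySem.Dict.mk r).getD "total" 0

-- ===== PORT A =====
def aggregate_by_store (records : List (List (String × Int))) : List (Int × Int) :=
  (records.foldl (fun storeSales record =>
      if storeSales.contains (pvSid record) = false then
        storeSales.insert (pvSid record) (pvTot record)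
      else
        storeSales.modify (pvSid record) 0 (· + pvTot record))
    PySem.Dict.empty).items

-- ===== PORT B =====
def aggregate_by_store_alt (records : List (List (String × Int))) : List (Int × Int) :=
  (PySem.List.dedup (records.map pvSid)).map
    (fun sid => (sid, ((records.filter (fun r => pvSid r == sid)).map pvTot).sum))

-- ===== PRECONDITION & SPEC =====
-- Pre_ excludes exactly the records missing a 'store_id' or 'total' key, on which Python A raises KeyError.
def Pre_aggregate_by_store (records : List (List (String × Int))) : Prop :=
  ∀ r ∈ records, (PySem.Dict.mk r).contains "store_id" = true ∧ (PySem.Dict.mk r).contains "total" = true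
instance (records : List (List (String × Int))) : Decidable (Pre_aggregate_by_store records) := by
  unfold Pre_aggregate_by_store; infer_instance
def pvWitness_aggregate_by_store : (List (List (String × Int))) :=
  [[("store_id", 1), ("total", 5)], [("store_id", 2), ("total", 3)], [("store_id", 1), ("total", 4)]]

def Spec_aggregate_by_store (records : List (List (String × Int))) (out : List (Int × Int)) : Prop := out = aggregate_by_store_alt records
instance (records : List (List (String × Int))) (out : List (Int × Int)) : Decidable (Spec_aggregate_by_store records out) := by unfold Spec_aggregate_by_store; infer_instance

-- ===== CLAIM (what is proved, stated in full; the proofs are below) =====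
def Claim_equal_aggregate_by_store : Prop := ∀ (records : List (List (String × Int))), Dom_aggregate_by_store records → Pre_aggregate_by_store records → Spec_aggregate_by_store records (aggregate_by_store records)

-- ===== LEMMAS AND PROOFS =====

-- the characterisation of A's loop: its items list is B's dedup-then-sum table
theorem aggregate_items (l : List (List (String × Int))) :
    aggregate_by_store l = aggregate_by_store_alt l := by
  unfold aggregate_by_store aggregate_by_store_alt
  induction l using List.reverseRecOn with
  | nil => rfl
  | append_singleton l r ih =>
    rw [List.foldl_append]
    simp only [List.foldl_cons, List.foldl_nil]
    set D := (l.foldl (fun storeSales record =>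
      if storeSales.contains (pvSid record) = false then
        storeSales.insert (pvSid record) (pvTot record)
      else
        storeSales.modify (pvSid record) 0 (· + pvTot record))
      PySem.Dict.empty) with hD
    have hkeys : D.keys = PySem.List.dedup (l.map pvSid) := by
      simp only [PySem.Dict.keys, ih, List.map_map]
      simp [Function.comp_def]
    have hnd : D.keys.Nodup := by rw [hkeys]; exact PySem.List.nodup_dedup _
    have hcont : ∀ s, D.contains s = decide (s ∈ PySem.List.dedup (l.map pvSid)) := by
      intro s; rw [PySem.Dict.contains_eq_decide_mem_keys, hkeys]
    by_cases hmem : pvSid r ∈ l.map pvSid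
    · -- existing key: modify branch
      have hc : D.contains (pvSid r) = true := by
        rw [hcont]; simpa [PySem.List.mem_dedup] using hmem
      rw [hc]
      simp only [Bool.true_eq_false, if_false]
      have hget : D.getD (pvSid r) 0
          = ((l.filter (fun x => pvSid x == pvSid r)).map pvTot).sum := by
        exact PySem.Dict.getD_of_mem_items D (by
          rw [ih]
          exact List.mem_map_of_mem (by simpa [PySem.List.mem_dedup] using hmem)) hnd 0
      have hdedup : PySem.List.dedup ((l ++ [r]).map pvSid) = PySem.List.dedup (l.map pvSid) := by
        simp only [List.map_append, List.map_cons, List.map_nil, PySem.List.dedup_eq_ofList,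
          PySem.Set.ofList_append_singleton]
        exact PySem.Set.add_of_mem (by simpa [PySem.Set.mem_ofList] using hmem)
      rw [hdedup]
      have hmod : D.modify (pvSid r) 0 (· + pvTot r)
          = D.insert (pvSid r) (D.getD (pvSid r) 0 + pvTot r) := rfl
      rw [hmod, PySem.Dict.items_insert_of_contains D (D.getD (pvSid r) 0 + pvTot r) hc,
        hget, ih, List.map_map]
      apply List.map_congr_left
      intro s hsmem
      by_cases hseq : s = pvSid r
      · subst hseq
        simp [List.filter_append]
      · have h1 : (s == pvSid r) = false := by simpa using hseq
        have h2 : (pvSid r == s) = false := by simpa using Ne.symm hseq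
        simp [List.filter_append, h2]
        exact fun h => absurd h hseq
    · -- fresh key: insert branch
      have hc : D.contains (pvSid r) = false := by
        rw [hcont]; simpa [PySem.List.mem_dedup] using hmem
      rw [hc]
      simp only [if_true]
      rw [PySem.Dict.items_insert_of_not_contains D (pvTot r) hc, ih]
      have hdedup : PySem.List.dedup ((l ++ [r]).map pvSid)
          = PySem.List.dedup (l.map pvSid) ++ [pvSid r] := by
        simp only [List.map_append, List.map_cons, List.map_nil, PySem.List.dedup_eq_ofList,
          PySem.Set.ofList_append_singleton]
        exact PySem.Set.add_of_not_mem (by simpa [PySem.Set.mem_ofList] using hmem)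
      rw [hdedup, List.map_append]
      congr 1
      · apply List.map_congr_left
        intro s hsmem
        have hne : pvSid r ≠ s := by
          rintro rfl; exact hmem (by simpa [PySem.List.mem_dedup] using hsmem)
        simp [List.filter_append, hne]
      · have hnil : l.filter (fun x => pvSid x == pvSid r) = [] := by
          apply List.filter_eq_nil_iff.mpr
          intro x hx hbeq
          exact hmem (List.mem_map.mpr ⟨x, hx, by simpa using hbeq⟩)
        simp [List.filter_append, hnil]

-- ===== VERDICT (by name: the statement is the Claim_ definition above) =====
theorem aggregate_by_store_spec : Claim_equal_aggregate_by_store := by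
  intro records _ _
  unfold Spec_aggregate_by_store
  exact aggregate_items records
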